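-- pv_equiv track=rewrite | github.com/ZephOne/fbi | fbi.py | lineJ
-- ===== SOURCE A (Python) =====
-- num = [1, 2, 3, 4, 5, 6, 7, 8, 9, 0]
--
-- def lineJ(Kh):
--     Kj = []
--     a = 1
--     for i in range(10):
--         Kj.append(Kh[i])
--     for i in num:
--         for j in range(10):
--             if i == Kh[j]:
--                 Kj[j]=a%10
--                 a+=1
--     return Kj
-- ===== SOURCE B (Python) =====
-- num = [1, 2, 3, 4, 5, 6, 7, 8, 9, 0]
--
-- def lineJ(Kh):
--     Kj = [Kh[j] for j in range(10)]
--     order = sorted((j for j in range(10) if Kh[j] in num),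
--                    key=lambda j: ((Kh[j] - 1) % 10) * 10 + j)
--     for a, j in enumerate(order, 1):
--         Kj[j] = a % 10
--     return Kj
-- ===== Notes on version B (the rewrite author's own statement) =====
-- stated objective: alternative
-- what changed: A rescans Kh[0..9] once per digit of num while threading a counter; B computes the assignment order once by sorting the digit-valued positions under the single integer key ((Kh[j]-1)%10)*10+j (num's digit order, then position) and then writes the ranks by enumeration.
import Mathlib
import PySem

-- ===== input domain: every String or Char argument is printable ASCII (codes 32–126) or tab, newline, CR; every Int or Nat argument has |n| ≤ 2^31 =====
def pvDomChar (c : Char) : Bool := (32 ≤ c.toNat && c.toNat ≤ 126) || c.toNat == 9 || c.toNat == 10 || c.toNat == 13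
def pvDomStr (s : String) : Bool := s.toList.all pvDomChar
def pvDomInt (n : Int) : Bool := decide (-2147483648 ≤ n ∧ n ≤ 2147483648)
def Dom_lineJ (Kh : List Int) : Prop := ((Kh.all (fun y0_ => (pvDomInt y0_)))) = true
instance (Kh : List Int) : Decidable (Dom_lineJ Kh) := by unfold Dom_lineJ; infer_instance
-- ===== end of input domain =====

-- B replaces A's ten counter-threading rescans of Kh by one sort of the digit-valued positions
-- under a key encoding num's digit order then position (objective: alternative algorithm).

-- ===== PORT A =====
def pvNum : List Int := [1, 2, 3, 4, 5, 6, 7, 8, 9, 0]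

-- Kj = []; for i in range(10): Kj.append(Kh[i])
def pvKjA (Kh : List Int) : List Int :=
  (PySem.List.pyRange 0 10 1).foldl (fun acc i => acc ++ [PySem.List.pyGetD Kh i 0]) []

-- inner loop body: for j in range(10): if i == Kh[j]: Kj[j] = a % 10; a += 1
def pvStepA (Kh : List Int) (st : List Int × Int) (i : Int) : List Int × Int :=
  (PySem.List.pyRange 0 10 1).foldl
    (fun (st : List Int × Int) j =>
      if i = PySem.List.pyGetD Kh j 0 then
        (st.1.set j.toNat (PySem.Int.mod st.2 10), st.2 + 1)
      else st)
    st

def lineJ (Kh : List Int) : List Int :=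
  (pvNum.foldl (pvStepA Kh) (pvKjA Kh, 1)).1

-- ===== PORT B =====
def pvNumB : List Int := [1, 2, 3, 4, 5, 6, 7, 8, 9, 0]

-- Kj = [Kh[j] for j in range(10)]
def pvKjB (Kh : List Int) : List Int :=
  (PySem.List.pyRange 0 10 1).map (fun j => PySem.List.pyGetD Kh j 0)

-- key=lambda j: ((Kh[j] - 1) % 10) * 10 + j
def pvKeyB (Kh : List Int) (j : Int) : Int :=
  PySem.Int.mod (PySem.List.pyGetD Kh j 0 - 1) 10 * 10 + j

-- sorted((j for j in range(10) if Kh[j] in num), key=...)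
def pvOrderB (Kh : List Int) : List Int :=
  PySem.List.sorted
    ((PySem.List.pyRange 0 10 1).filter (fun j => decide (PySem.List.pyGetD Kh j 0 ∈ pvNumB)))
    (pvKeyB Kh)

-- for a, j in enumerate(order, 1): Kj[j] = a % 10
def lineJ_alt (Kh : List Int) : List Int :=
  (PySem.List.enumerate (pvOrderB Kh) 1).foldl
    (fun Kj p => Kj.set p.2.toNat (PySem.Int.mod p.1 10)) (pvKjB Kh)

-- ===== PRECONDITION & SPEC =====
-- Pre_ excludes lists with fewer than ten elements, on which Python A (and B) raise IndexError.
def Pre_lineJ (Kh : List Int) : Prop := 10 ≤ Kh.length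
instance (Kh : List Int) : Decidable (Pre_lineJ Kh) := by unfold Pre_lineJ; infer_instance

def pvWitness_lineJ : List Int := [3, 1, 4, 1, 5, 9, 2, 6, 5, 0]

def Spec_lineJ (Kh : List Int) (out : List Int) : Prop := out = lineJ_alt Kh
instance (Kh : List Int) (out : List Int) : Decidable (Spec_lineJ Kh out) := by unfold Spec_lineJ; infer_instance

-- ===== CLAIM =====
def Claim_equal_lineJ : Prop := ∀ (Kh : List Int), Dom_lineJ Kh → Pre_lineJ Kh → Spec_lineJ Kh (lineJ Kh)

-- ===== LEMMAS AND PROOFS =====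

-- The counter-threading assignment fold equals B's enumerate-driven fold.
theorem pv_assign_enum (L : List Int) (Kj : List Int) (a : Int) :
    (L.foldl (fun (st : List Int × Int) j =>
        (st.1.set j.toNat (PySem.Int.mod st.2 10), st.2 + 1)) (Kj, a)).1
      = (PySem.List.enumerate L a).foldl
          (fun Kj p => Kj.set p.2.toNat (PySem.Int.mod p.1 10)) Kj := by
  induction L generalizing Kj a with
  | nil => rfl
  | cons j rest ih => simp only [List.foldl_cons, PySem.List.enumerate_cons]; exact ih _ _

-- A loop of inner folds is one fold over the concatenation.
theorem pv_foldl_flatMap {α β σ : Type} (l : List α) (g : α → List β) (f : σ → β → σ)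
    (init : σ) :
    l.foldl (fun acc i => (g i).foldl f acc) init = (l.flatMap g).foldl f init := by
  induction l generalizing init with
  | nil => rfl
  | cons x xs ih => simp only [List.foldl_cons, List.flatMap_cons, List.foldl_append, ih]

-- Splitting a filter over a disjunction of disjoint tests, up to permutation.
theorem pv_filter_or_perm {α : Type} (xs : List α) (p q : α → Bool)
    (h : ∀ x, p x = true → q x = false) :
    (xs.filter (fun x => p x || q x)).Perm (xs.filter p ++ xs.filter q) := by
  induction xs with
  | nil => simp
  | cons x xs ih =>
    by_cases hp : p x = true
    · simpa [List.filter_cons, hp, h x hp] using ih.cons x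
    · by_cases hq : q x = true
      · simp only [List.filter_cons, hp, hq, Bool.false_or,
          Bool.not_eq_true] at *
        exact ih.cons x |>.trans (List.perm_middle.symm)
      · simp only [List.filter_cons, hp, hq, Bool.false_or]
        simpa [hq] using ih

-- Collecting the matches of each distinct key is, up to order, one filter by membership.
theorem pv_flatMap_filter_perm (ks : List Int) (xs : List Int) (g : Int → Int)
    (hnd : ks.Nodup) :
    (ks.flatMap (fun i => xs.filter (fun x => decide (i = g x)))).Perm
      (xs.filter (fun x => decide (g x ∈ ks))) := by
  induction ks with
  | nil => simp
  | cons k ks ih =>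
    simp only [List.flatMap_cons]
    have hknd := (List.nodup_cons.mp hnd).2
    have hk : k ∉ ks := (List.nodup_cons.mp hnd).1
    have hperm := pv_filter_or_perm xs (fun x => decide (k = g x)) (fun x => decide (g x ∈ ks))
      (by intro x hx; simp at hx ⊢; intro hmem; exact hk (hx ▸ hmem))
    have : (xs.filter (fun x => decide (g x ∈ k :: ks)))
        = xs.filter (fun x => decide (k = g x) || decide (g x ∈ ks)) := by
      apply List.filter_congr; intro x _
      simp [List.mem_cons, eq_comm]
    rw [this]
    exact (List.Perm.append_left _ (ih hknd)).trans hperm.symm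

-- membership bounds for elements of the filtered range
theorem pv_mem_block (Kh : List Int) (i x : Int)
    (hx : x ∈ (PySem.List.pyRange 0 10 1).filter (fun j => decide (i = PySem.List.pyGetD Kh j 0))) :
    0 ≤ x ∧ x < 10 ∧ PySem.List.pyGetD Kh x 0 = i := by
  rcases List.mem_filter.mp hx with ⟨hr, hd⟩
  rcases (PySem.List.mem_pyRange_one.mp hr) with ⟨h1, h2⟩
  exact ⟨h1, h2, (of_decide_eq_true hd).symm⟩

-- The order in which A performs its assignments is strictly increasing under B's key.
theorem pv_pairwise_key (Kh : List Int) :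
    (pvNum.flatMap (fun i =>
        (PySem.List.pyRange 0 10 1).filter
          (fun j => decide (i = PySem.List.pyGetD Kh j 0)))).Pairwise
      (fun a b => pvKeyB Kh a < pvKeyB Kh b) := by
  apply List.pairwise_flatMap.mpr
  constructor
  · intro i _
    have hp : ((PySem.List.pyRange 0 10 1).filter
        (fun j => decide (i = PySem.List.pyGetD Kh j 0))).Pairwise (· < ·) :=
      (PySem.List.pairwise_lt_pyRange_one 0 10).filter _
    refine hp.imp_of_mem ?_
    intro a b ha hb hab
    rcases pv_mem_block Kh i a ha with ⟨_, _, hA⟩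
    rcases pv_mem_block Kh i b hb with ⟨_, _, hB⟩
    unfold pvKeyB
    rw [hA, hB]
    omega
  · have hnum : pvNum.Pairwise
        (fun i i' => PySem.Int.mod (i - 1) 10 < PySem.Int.mod (i' - 1) 10) := by decide
    refine hnum.imp_of_mem ?_
    intro i i' _ _ hlt a ha b hb
    rcases pv_mem_block Kh i a ha with ⟨ha0, ha10, hA⟩
    rcases pv_mem_block Kh i' b hb with ⟨hb0, _, hB⟩
    unfold pvKeyB
    rw [hA, hB]
    omega

-- A's flatMap order is a permutation of B's filtered position list.
theorem pv_perm (Kh : List Int) :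
    (pvNum.flatMap (fun i =>
        (PySem.List.pyRange 0 10 1).filter
          (fun j => decide (i = PySem.List.pyGetD Kh j 0)))).Perm
      ((PySem.List.pyRange 0 10 1).filter
        (fun j => decide (PySem.List.pyGetD Kh j 0 ∈ pvNumB))) :=
  pv_flatMap_filter_perm pvNum (PySem.List.pyRange 0 10 1)
    (fun j => PySem.List.pyGetD Kh j 0) (by decide)

-- Hence B's sorted order IS A's assignment order.
theorem pv_order_eq (Kh : List Int) :
    pvOrderB Kh = pvNum.flatMap (fun i =>
        (PySem.List.pyRange 0 10 1).filter
          (fun j => decide (i = PySem.List.pyGetD Kh j 0))) := by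
  unfold pvOrderB
  exact PySem.List.sorted_eq_of_perm_of_pairwise_lt _ _ _ (pv_perm Kh) (pv_pairwise_key Kh)

theorem pv_init_eq (Kh : List Int) : pvKjA Kh = pvKjB Kh := by
  rw [pvKjA, pvKjB, PySem.List.foldl_append_singleton_eq_map, List.nil_append]

theorem lineJ_spec : Claim_equal_lineJ := by
  intro Kh _ _
  show lineJ Kh = lineJ_alt Kh
  unfold lineJ lineJ_alt pvStepA
  rw [pv_init_eq]
  have h1 : ∀ (st : List Int × Int) (i : Int),
      (PySem.List.pyRange 0 10 1).foldl
        (fun (st : List Int × Int) j =>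
          if i = PySem.List.pyGetD Kh j 0 then
            (st.1.set j.toNat (PySem.Int.mod st.2 10), st.2 + 1)
          else st) st
      = ((PySem.List.pyRange 0 10 1).filter
          (fun j => decide (i = PySem.List.pyGetD Kh j 0))).foldl
          (fun (st : List Int × Int) j =>
            (st.1.set j.toNat (PySem.Int.mod st.2 10), st.2 + 1)) st := by
    intro st i
    exact PySem.List.foldl_ite_eq_foldl_filter (p := fun j => i = PySem.List.pyGetD Kh j 0) ..
  simp only [h1]
  rw [pv_foldl_flatMap, ← pv_order_eq, pv_assign_enum]
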